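-- pv_equiv track=rewrite | github.com/crolvlee/Algorithm | 프로그래머스/2/142085. 디펜스 게임/디펜스 게임.py | solution
-- ===== SOURCE A (Python) =====
-- def solution(n, k, enemy):
--     start = 0
--     end = len(enemy)
--
--     while start < end:
--         mid = (start + end) // 2
--
--         now_enemy = enemy[0:mid+1]
--         now_enemy.sort()
--         now_sum = sum(now_enemy[0:-k])
--
--         if now_sum <= n:
--             start = mid + 1
--         else:
--             end = mid
--
--
--     answer = start
--     return answer
-- ===== SOURCE B (Python) =====
-- def _merge(a, b):
--     # leftist min-heap merge; a node is [value, rank, left, right], an empty heap is None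
--     if a is None:
--         return b
--     if b is None:
--         return a
--     if b[0] < a[0]:
--         a, b = b, a
--     r = _merge(a[3], b)
--     l = a[2]
--     rr = r[1] if r is not None else 0
--     ll = l[1] if l is not None else 0
--     if rr <= ll:
--         return [a[0], rr + 1, l, r]
--     else:
--         return [a[0], ll + 1, r, l]
--
--
-- def solution(n, k, enemy):
--     # One incremental pass: keep the k largest enemies seen so far in a leftist
--     # min-heap; 'paid' = total of everything ever pushed out of (or never into)
--     # the heap = cost of defending this prefix.  costs[t] = cost of rounds 0..t.
--     costs = []
--     heap = None
--     size = 0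
--     paid = 0
--     for e in enemy:
--         if size < k:
--             heap = _merge(heap, [e, 1, None, None])
--             size += 1
--         else:
--             root = heap[0]
--             if root < e:
--                 paid += root
--                 heap = _merge(_merge(heap[2], heap[3]), [e, 1, None, None])
--             else:
--                 paid += e
--         costs.append(paid)
--     # binary search over the precomputed costs (same probe rule as A's loop)
--     lo, hi = 0, len(enemy)
--     while lo < hi:
--         mid = (lo + hi) // 2
--         if costs[mid] <= n:
--             lo = mid + 1
--         else:
--             hi = mid
--     return lo
-- ===== Notes on version B (the rewrite author's own statement) =====
-- stated objective: alternative
-- what changed: A re-sorts and re-sums a growing prefix at every binary-search probe; B makes one incremental pass that keeps the k largest enemies seen so far in a hand-rolled leftist min-heap and records each prefix's cost, so the binary search then only reads precomputed costs.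
-- outside the precondition, e.g. on solution(5, 0, [1, 2, 3]): A returns 3, B raises TypeError; on solution(5, -1, [4, 3]): A returns 2, B raises TypeError
import Mathlib
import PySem

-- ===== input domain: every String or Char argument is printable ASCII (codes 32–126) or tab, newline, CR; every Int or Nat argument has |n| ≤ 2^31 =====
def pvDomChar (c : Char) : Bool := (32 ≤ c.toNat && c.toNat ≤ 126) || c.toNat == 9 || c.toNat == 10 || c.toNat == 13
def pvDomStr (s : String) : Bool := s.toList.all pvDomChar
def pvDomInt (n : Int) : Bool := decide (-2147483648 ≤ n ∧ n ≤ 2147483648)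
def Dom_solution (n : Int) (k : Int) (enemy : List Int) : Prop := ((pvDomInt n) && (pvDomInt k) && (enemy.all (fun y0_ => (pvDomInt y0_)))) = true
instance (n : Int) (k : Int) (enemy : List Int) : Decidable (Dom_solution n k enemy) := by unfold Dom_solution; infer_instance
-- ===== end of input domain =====

-- B replaces A's per-probe sort of a growing prefix by one incremental pass that
-- keeps the k largest enemies seen so far in a leftist min-heap and records each
-- prefix's cost; the binary search then reads precomputed costs (objective: alternative).

-- ===== PORT A =====
-- the while-loop of A: state (start, end); per probe it sorts the prefix and sums all but the k largest
def solutionLoop (n : Int) (k : Int) (enemy : List Int) (start stop : Int) : Int :=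
  if h : start < stop then
    let mid := PySem.Int.floordiv (start + stop) 2
    let now_enemy := PySem.List.slice enemy (some 0) (some (mid + 1))
    let now_sorted := PySem.List.sorted now_enemy (fun x => x) false
    let now_sum := (PySem.List.slice now_sorted (some 0) (some (-k))).sum
    if now_sum ≤ n then solutionLoop n k enemy (mid + 1) stop
    else solutionLoop n k enemy start mid
  else start
termination_by (stop - start).toNat
decreasing_by
  · have h1 := PySem.Int.floordiv_two_mid_bounds (le_of_lt h)
    have h2 : PySem.Int.floordiv (start + stop) 2 < stop := by
      rw [PySem.Int.floordiv_lt_iff_lt_mul (by omega)]; omega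
    omega
  · have h1 := PySem.Int.floordiv_two_mid_bounds (le_of_lt h)
    have h2 : PySem.Int.floordiv (start + stop) 2 < stop := by
      rw [PySem.Int.floordiv_lt_iff_lt_mul (by omega)]; omega
    omega

def solution (n : Int) (k : Int) (enemy : List Int) : Int :=
  solutionLoop n k enemy 0 (enemy.length : Int)

-- ===== PORT B =====
-- a leftist min-heap node [value, rank, left, right]; None is the empty heap
inductive HeapAlt where
  | nil : HeapAlt
  | node : Int → Int → HeapAlt → HeapAlt → HeapAlt
deriving DecidableEq, Repr

-- r[1] if r is not None else 0
def rankAlt : HeapAlt → Int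
  | .nil => 0
  | .node _ s _ _ => s

-- node count, the termination measure of the merge recursion
def heapSizeAlt : HeapAlt → Nat
  | .nil => 0
  | .node _ _ l r => heapSizeAlt l + heapSizeAlt r + 1

-- _merge: leftist min-heap merge
def mergeAlt : HeapAlt → HeapAlt → HeapAlt
  | .nil, b => b
  | .node x s l r, .nil => .node x s l r
  | .node x s l r, .node y t l' r' =>
    if y < x then
      -- Python swaps a and b when b's root is smaller
      let m := mergeAlt r' (.node x s l r)
      if rankAlt m ≤ rankAlt l' then .node y (rankAlt m + 1) l' m
      else .node y (rankAlt l' + 1) m l'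
    else
      let m := mergeAlt r (.node y t l' r')
      if rankAlt m ≤ rankAlt l then .node x (rankAlt m + 1) l m
      else .node x (rankAlt l + 1) m l
termination_by a b => heapSizeAlt a + heapSizeAlt b
decreasing_by
  · simp only [heapSizeAlt]; omega
  · simp only [heapSizeAlt]; omega

-- the for-loop of B: carries (heap, size, paid), emits one cost per enemy
def buildCosts (k : Int) (heap : HeapAlt) (size : Int) (paid : Int) : List Int → List Int
  | [] => []
  | e :: rest =>
    if size < k then
      paid :: buildCosts k (mergeAlt heap (.node e 1 .nil .nil)) (size + 1) paid rest
    else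
      match heap with
      | .node x _ l r =>
        if x < e then
          (paid + x) :: buildCosts k (mergeAlt (mergeAlt l r) (.node e 1 .nil .nil)) size (paid + x) rest
        else (paid + e) :: buildCosts k heap size (paid + e) rest
      | .nil => (paid + e) :: buildCosts k heap size (paid + e) rest
        -- the heap is empty here only when k ≤ 0, where the Python B raises
        -- TypeError on heap[0]; those inputs are outside Pre_solution

-- the while-loop of B: binary search over the precomputed costs
def bisectAlt (n : Int) (costs : List Int) (lo hi : Int) : Int :=
  if h : lo < hi then
    let mid := PySem.Int.floordiv (lo + hi) 2
    -- costs[mid]: the index is always in range here (0 ≤ lo ≤ mid < hi ≤ len costs)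
    if PySem.List.pyGetD costs mid 0 ≤ n then bisectAlt n costs (mid + 1) hi
    else bisectAlt n costs lo mid
  else lo
termination_by (hi - lo).toNat
decreasing_by
  · have h1 := PySem.Int.floordiv_two_mid_bounds (le_of_lt h)
    have h2 : PySem.Int.floordiv (lo + hi) 2 < hi := by
      rw [PySem.Int.floordiv_lt_iff_lt_mul (by omega)]; omega
    omega
  · have h1 := PySem.Int.floordiv_two_mid_bounds (le_of_lt h)
    have h2 : PySem.Int.floordiv (lo + hi) 2 < hi := by
      rw [PySem.Int.floordiv_lt_iff_lt_mul (by omega)]; omega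
    omega

def solution_alt (n : Int) (k : Int) (enemy : List Int) : Int :=
  bisectAlt n (buildCosts k .nil 0 0 enemy) 0 (enemy.length : Int)

-- ===== PRECONDITION & SPEC =====
-- Pre_ excludes k ≤ 0: a non-positive number of free passes is outside the problem's
-- stated domain (1 ≤ k); there A's slice now_enemy[0:-k] no longer means "all but the
-- k largest" and B itself raises IndexError on free[0].
def Pre_solution (n : Int) (k : Int) (enemy : List Int) : Prop := 1 ≤ k
instance (n : Int) (k : Int) (enemy : List Int) : Decidable (Pre_solution n k enemy) := by
  unfold Pre_solution; infer_instance

def pvWitness_solution : Int × Int × List Int := (10, 2, [4, 2, 4, 5, 3, 3, 1])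

def Spec_solution (n : Int) (k : Int) (enemy : List Int) (out : Int) : Prop := out = solution_alt n k enemy
instance (n : Int) (k : Int) (enemy : List Int) (out : Int) : Decidable (Spec_solution n k enemy out) := by unfold Spec_solution; infer_instance

-- ===== CLAIM (what is proved, stated in full; the proofs are below) =====
def Claim_equal_solution : Prop := ∀ (n : Int) (k : Int) (enemy : List Int), Dom_solution n k enemy → Pre_solution n k enemy → Spec_solution n k enemy (solution n k enemy)

-- ===== LEMMAS AND PROOFS =====

-- proof-side: linear ordered insertion (used to name sorted(pre ++ [e]))
def insortAlt (a : List Int) (x : Int) : List Int :=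
  match a with
  | [] => [x]
  | y :: ys => if y < x then y :: insortAlt ys x else x :: y :: ys

-- proof-side: the heap's contents, root first
def toL : HeapAlt → List Int
  | .nil => []
  | .node x _ l r => x :: (toL l ++ toL r)

-- proof-side: the min-heap property (ranks are irrelevant to values)
def IsHeapAlt : HeapAlt → Prop
  | .nil => True
  | .node x _ l r => (∀ y ∈ toL l ++ toL r, x ≤ y) ∧ IsHeapAlt l ∧ IsHeapAlt r


-- A's probe value at index mid (exactly the let-body of solutionLoop)
def nowSumA (k : Int) (enemy : List Int) (mid : Int) : Int :=
  (PySem.List.slice (PySem.List.sorted (PySem.List.slice enemy (some 0) (some (mid + 1))) (fun x => x) false) (some 0) (some (-k))).sum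

-- the cost of defending the whole list l with k' free passes
def preCost (k' : Nat) (l : List Int) : Int :=
  ((PySem.List.sorted l (fun x => x) false).take (l.length - k')).sum

-- the list buildCosts is expected to produce
def expCosts (k' : Nat) (pre : List Int) : List Int → List Int
  | [] => []
  | e :: rest => preCost k' (pre ++ [e]) :: expCosts k' (pre ++ [e]) rest

theorem length_insortAlt (a : List Int) (x : Int) : (insortAlt a x).length = a.length + 1 := by
  induction a with
  | nil => rfl
  | cons y ys ih => simp only [insortAlt]; split <;> simp [ih]

theorem perm_insortAlt (a : List Int) (x : Int) : (insortAlt a x).Perm (x :: a) := by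
  induction a with
  | nil => rfl
  | cons y ys ih =>
    simp only [insortAlt]; split
    · exact (ih.cons y).trans (List.Perm.swap x y ys)
    · rfl

theorem sum_insortAlt (a : List Int) (x : Int) : (insortAlt a x).sum = x + a.sum := by
  simpa using (perm_insortAlt a x).sum_eq

theorem pairwise_insortAlt (a : List Int) (x : Int) (h : a.Pairwise (· ≤ ·)) :
    (insortAlt a x).Pairwise (· ≤ ·) := by
  induction a with
  | nil => simp [insortAlt]
  | cons y ys ih =>
    simp only [insortAlt]
    rcases List.pairwise_cons.mp h with ⟨hy, hys⟩
    split
    · rename_i hlt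
      refine List.pairwise_cons.mpr ⟨?_, ih hys⟩
      intro z hz
      rw [(perm_insortAlt ys x).mem_iff, List.mem_cons] at hz
      rcases hz with rfl | hz
      · omega
      · exact hy z hz
    · rename_i hge
      refine List.pairwise_cons.mpr ⟨?_, h⟩
      intro z hz
      rw [List.mem_cons] at hz
      rcases hz with rfl | hz
      · omega
      · exact le_trans (by omega) (hy z hz)

theorem insortAlt_append_right (a b : List Int) (x : Int) (h : ∀ y ∈ a, y < x) :
    insortAlt (a ++ b) x = a ++ insortAlt b x := by
  induction a with
  | nil => rfl
  | cons y ys ih =>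
    simp only [List.cons_append, insortAlt]
    rw [if_pos (h y (by simp)), ih (fun z hz => h z (by simp [hz]))]

theorem insortAlt_append_left (a b : List Int) (x : Int) (h : ∃ y ∈ a, x ≤ y) :
    insortAlt (a ++ b) x = insortAlt a x ++ b := by
  induction a with
  | nil => simp at h
  | cons y ys ih =>
    simp only [List.cons_append, insortAlt]
    by_cases hy : y < x
    · rw [if_pos hy, if_pos hy, List.cons_append, ih]
      rcases h with ⟨z, hz, hxz⟩
      rw [List.mem_cons] at hz
      rcases hz with rfl | hz
      · omega
      · exact ⟨z, hz, hxz⟩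
    · rw [if_neg hy, if_neg hy]; rfl

-- sorted(pre + [e]) is insertion into sorted(pre)
theorem sorted_append_singleton (pre : List Int) (e : Int) :
    PySem.List.sorted (pre ++ [e]) (fun x => x) false
      = insortAlt (PySem.List.sorted pre (fun x => x) false) e := by
  apply PySem.List.sorted_id_eq_of_perm_of_pairwise
  · exact (perm_insortAlt _ _).trans
      (((PySem.List.sorted_perm pre (fun x => x) false).cons e).trans
        (List.perm_append_singleton e pre).symm)
  · exact pairwise_insortAlt _ _ (by simpa using PySem.List.sorted_pairwise pre (fun x => x))

-- every element of the first j+1 entries of the sorted list is at most entry j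
theorem mem_take_le (pre : List Int) (j : Nat)
    (hj : j < (PySem.List.sorted pre (fun x => x) false).length) :
    ∀ y ∈ (PySem.List.sorted pre (fun x => x) false).take (j + 1),
      y ≤ (PySem.List.sorted pre (fun x => x) false)[j] := by
  intro y hy
  obtain ⟨i, hi, rfl⟩ := List.getElem_of_mem hy
  rw [List.getElem_take]
  exact PySem.List.sorted_id_getElem_mono pre (by simp at hi; omega) hj

theorem merge_perm (a b : HeapAlt) : (toL (mergeAlt a b)).Perm (toL a ++ toL b) := by
  fun_induction mergeAlt a b with
  | case1 b => simp [toL]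
  | case2 x s l r => simp [toL]
  | case3 x s l r y t l' r' h1 m hr ih | case4 x s l r y t l' r' h1 m hr ih =>
    have hm : toL m = toL (mergeAlt r' (HeapAlt.node x s l r)) := rfl
    rw [← Multiset.coe_eq_coe] at ih ⊢
    simp only [toL, hm, ← Multiset.cons_coe, ← Multiset.coe_add] at ih ⊢
    rw [ih]
    simp only [← Multiset.singleton_add]
    abel
  | case5 x s l r y t l' r' h1 m hr ih | case6 x s l r y t l' r' h1 m hr ih =>
    have hm : toL m = toL (mergeAlt r (HeapAlt.node y t l' r')) := rfl
    rw [← Multiset.coe_eq_coe] at ih ⊢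
    simp only [toL, hm, ← Multiset.cons_coe, ← Multiset.coe_add] at ih ⊢
    rw [ih]
    simp only [← Multiset.singleton_add]
    abel

theorem isHeapNode (v ρ : Int) (c1 c2 : HeapAlt)
    (h1 : ∀ z ∈ toL c1, v ≤ z) (h2 : ∀ z ∈ toL c2, v ≤ z)
    (hc1 : IsHeapAlt c1) (hc2 : IsHeapAlt c2) : IsHeapAlt (.node v ρ c1 c2) :=
  ⟨fun z hz => (List.mem_append.mp hz).elim (h1 z) (h2 z), hc1, hc2⟩

theorem isHeap_merge (a b : HeapAlt) (ha : IsHeapAlt a) (hb : IsHeapAlt b) :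
    IsHeapAlt (mergeAlt a b) := by
  fun_induction mergeAlt a b with
  | case1 b => exact hb
  | case2 x s l r => exact ha
  | case3 x s l r y t l' r' h1 m hr ih | case4 x s l r y t l' r' h1 m hr ih =>
    obtain ⟨hyb, hl', hr'⟩ := hb
    have hm : IsHeapAlt m := ih hr' ha
    have hbound : ∀ z ∈ toL m, y ≤ z := by
      intro z hz
      have hz2 := List.mem_append.mp ((merge_perm r' (.node x s l r)).mem_iff.mp hz)
      rcases hz2 with hz' | hz'
      · exact hyb z (List.mem_append.mpr (Or.inr hz'))
      · -- z is in a: z = x or z below x; in both cases y ≤ z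
        simp only [toL, List.mem_cons] at hz'
        rcases hz' with rfl | hz'
        · omega
        · exact le_trans (by omega) (ha.1 z hz')
    have hbl' : ∀ z ∈ toL l', y ≤ z := fun z hz => hyb z (List.mem_append.mpr (Or.inl hz))
    first
      | exact isHeapNode y _ l' m hbl' hbound hl' hm
      | exact isHeapNode y _ m l' hbound hbl' hm hl'
  | case5 x s l r y t l' r' h1 m hr ih | case6 x s l r y t l' r' h1 m hr ih =>
    obtain ⟨hxa, hl, hr2⟩ := ha
    have hm : IsHeapAlt m := ih hr2 hb
    have hbound : ∀ z ∈ toL m, x ≤ z := by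
      intro z hz
      have hz2 := List.mem_append.mp ((merge_perm r (.node y t l' r')).mem_iff.mp hz)
      rcases hz2 with hz' | hz'
      · exact hxa z (List.mem_append.mpr (Or.inr hz'))
      · simp only [toL, List.mem_cons] at hz'
        rcases hz' with rfl | hz'
        · omega
        · exact le_trans (by omega) (hb.1 z hz')
    have hbl : ∀ z ∈ toL l, x ≤ z := fun z hz => hxa z (List.mem_append.mpr (Or.inl hz))
    first
      | exact isHeapNode x _ l m hbl hbound hl hm
      | exact isHeapNode x _ m l hbound hbl hm hl

-- every element at or after position m of the sorted list is at least entry m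
theorem mem_drop_ge (pre : List Int) (m : Nat)
    (hm : m < (PySem.List.sorted pre (fun x => x) false).length) :
    ∀ y ∈ (PySem.List.sorted pre (fun x => x) false).drop m,
      (PySem.List.sorted pre (fun x => x) false)[m] ≤ y := by
  intro y hy
  obtain ⟨i, hi, rfl⟩ := List.getElem_of_mem hy
  rw [List.getElem_drop]
  exact PySem.List.sorted_id_getElem_mono pre (by omega)
    (by simp [PySem.List.length_sorted] at hi ⊢; omega)

theorem buildCosts_eq (k' : Nat) (hk : 1 ≤ k') :
    ∀ (xs pre : List Int) (heap : HeapAlt),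
      IsHeapAlt heap →
      (toL heap).Perm ((PySem.List.sorted pre (fun x => x) false).drop (pre.length - k')) →
      buildCosts (k' : Int) heap ((min pre.length k' : Nat) : Int)
        (((PySem.List.sorted pre (fun x => x) false).take (pre.length - k')).sum) xs
      = expCosts k' pre xs := by
  intro xs
  induction xs with
  | nil => intro pre heap _ _; rfl
  | cons e rest ih =>
    intro pre heap hheap hperm
    have hS' := sorted_append_singleton pre e
    have hlenS : (PySem.List.sorted pre (fun x => x) false).length = pre.length :=
      PySem.List.length_sorted pre (fun x => x) false
    set S := PySem.List.sorted pre (fun x => x) false with hS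
    set t := pre.length with ht
    have hlen' : (pre ++ [e]).length = t + 1 := by simp [ht]
    have hsingle : IsHeapAlt (.node e 1 .nil .nil) := by
      constructor
      · intro y hy; simp [toL] at hy
      · exact ⟨trivial, trivial⟩
    by_cases hcase : t < k'
    · -- the heap is not full yet: push e, pay nothing
      have hm : t - k' = 0 := by omega
      have hm' : (t + 1) - k' = 0 := by omega
      have hmin1 : min t k' = t := by omega
      have hmin2 : min (t + 1) k' = t + 1 := by omega
      have hcond : ((min t k' : Nat) : Int) < (k' : Int) := by
        rw [hmin1]; exact_mod_cast hcase
      simp only [buildCosts, expCosts, if_pos hcond]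
      refine List.cons_eq_cons.mpr ⟨?_, ?_⟩
      · unfold preCost
        rw [hm]
        rw [hlen', hm']
        simp
      · have hsz : ((min t k' : Nat) : Int) + 1 = ((min (t + 1) k' : Nat) : Int) := by
          exact_mod_cast (by omega : min t k' + 1 = min (t + 1) k')
        have hperm' : (toL (mergeAlt heap (.node e 1 .nil .nil))).Perm (insortAlt S e) := by
          refine ((merge_perm heap _).trans ?_)
          show (toL heap ++ [e]).Perm (insortAlt S e)
          rw [hm, List.drop_zero] at hperm
          exact ((hperm.append_right [e]).trans (List.perm_append_singleton e S)).trans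
            (perm_insortAlt S e).symm
        have := ih (pre ++ [e]) (mergeAlt heap (.node e 1 .nil .nil))
          (isHeap_merge _ _ hheap hsingle) (by rw [hS', hlen', hm', List.drop_zero]; exact hperm')
        rw [hS', hlen', hm'] at this
        rw [hsz]
        simp only [hm]
        simpa using this
    · -- the heap holds the k' largest of pre
      have hmt : t - k' < t := by omega
      have hdropcons : S.drop (t - k') = S[t - k']'(by omega) :: S.drop ((t - k') + 1) :=
        List.drop_eq_getElem_cons (by omega)
      have hlendrop : (S.drop (t - k')).length = k' := by simp [hlenS]; omega
      have hmin1 : min t k' = k' := by omega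
      have hmin2 : min (t + 1) k' = k' := by omega
      have hsz2 : ((min t k' : Nat) : Int) = ((min (t + 1) k' : Nat) : Int) := by
        rw [hmin1, hmin2]
      have hcond : ¬ ((min t k' : Nat) : Int) < (k' : Int) := by
        rw [hmin1]; exact lt_irrefl _
      have hmm : (t + 1) - k' = (t - k') + 1 := by omega
      -- the heap cannot be empty
      obtain ⟨x, sr, l, r, rfl⟩ : ∃ x sr l r, heap = HeapAlt.node x sr l r := by
        cases heap with
        | nil =>
          exfalso
          have := hperm.length_eq
          simp [toL, hlendrop] at this
          omega
        | node a b c d => exact ⟨a, b, c, d, rfl⟩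
      have hxmem : x ∈ toL (.node x sr l r : HeapAlt) := by simp [toL]
      have hrootmin : ∀ y ∈ toL (.node x sr l r : HeapAlt), x ≤ y := by
        intro y hy
        simp only [toL, List.mem_cons] at hy
        rcases hy with rfl | hy
        · exact le_refl y
        · exact hheap.1 y hy
      have hx : x = S[t - k']'(by omega) := by
        have h1 : S[t - k']'(by omega) ≤ x := by
          refine mem_drop_ge pre (t - k') (by rw [PySem.List.length_sorted]; omega) x ?_
          exact hperm.mem_iff.mp hxmem
        have h2 : x ≤ S[t - k']'(by omega) := by
          refine hrootmin _ (hperm.symm.mem_iff.mp ?_)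
          rw [hdropcons]; exact List.mem_cons_self
        omega
      have htail : (toL l ++ toL r).Perm (S.drop ((t - k') + 1)) := by
        have : (x :: (toL l ++ toL r)).Perm (S[t - k']'(by omega) :: S.drop ((t - k') + 1)) := by
          rw [← hdropcons]; exact hperm
        rw [hx] at this
        exact this.cons_inv
      simp only [buildCosts, expCosts, if_neg hcond]
      by_cases hfe : x < e
      · -- e replaces the smallest buffered enemy
        have hfe' : S[t - k']'(by omega) < e := by omega
        have hins : insortAlt S e
            = S.take ((t - k') + 1) ++ insortAlt (S.drop ((t - k') + 1)) e := by
          conv_lhs => rw [← List.take_append_drop ((t - k') + 1) S]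
          refine insortAlt_append_right _ _ _ ?_
          intro y hy
          have := mem_take_le pre (t - k') (by rw [PySem.List.length_sorted]; omega) y
            (by rw [← hS]; exact hy)
          exact lt_of_le_of_lt this hfe'
        have hlentake : (S.take ((t - k') + 1)).length = (t - k') + 1 := by
          simp [hlenS]; omega
        have hsum' : ((PySem.List.sorted (pre ++ [e]) (fun x => x) false).take ((pre ++ [e]).length - k')).sum
            = (S.take (t - k')).sum + S[t - k']'(by omega) := by
          rw [hS', hlen', hmm, hins, List.take_left' hlentake]
          exact List.sum_take_succ S (t - k') (by omega)
        rw [if_pos hfe]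
        refine List.cons_eq_cons.mpr ⟨?_, ?_⟩
        · unfold preCost
          rw [hsum', hx]
        · have hperm' : (toL (mergeAlt (mergeAlt l r) (.node e 1 .nil .nil))).Perm
              (insortAlt (S.drop ((t - k') + 1)) e) := by
            refine (merge_perm _ _).trans ?_
            show ((toL (mergeAlt l r)) ++ [e]).Perm _
            refine (((merge_perm l r).append_right [e]).trans ?_)
            exact ((htail.append_right [e]).trans
              (List.perm_append_singleton e _)).trans (perm_insortAlt _ _).symm
          have := ih (pre ++ [e]) (mergeAlt (mergeAlt l r) (.node e 1 .nil .nil))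
            (isHeap_merge _ _ (isHeap_merge _ _ hheap.2.1 hheap.2.2) hsingle)
            (by rw [hS', hlen', hmm, hins, List.drop_left' hlentake]; exact hperm')
          rw [hS', hlen', hmm, hins, List.take_left' hlentake,
            List.sum_take_succ S (t - k') (by omega)] at this
          rw [hsz2, hx]
          exact this
      · -- e is paid for; the heap is unchanged
        rw [if_neg hfe]
        -- common facts for the two possible insertion positions of e
        have hfin : ((PySem.List.sorted (pre ++ [e]) (fun x => x) false).take ((pre ++ [e]).length - k')).sum
              = (S.take (t - k')).sum + e
            ∧ (PySem.List.sorted (pre ++ [e]) (fun x => x) false).drop ((pre ++ [e]).length - k')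
              = S.drop (t - k') := by
          rw [hS', hlen', hmm]
          have hlentk : (S.take (t - k')).length = t - k' := by simp [hlenS]
          by_cases hall : ∀ y ∈ S.take (t - k'), y < e
          · have hins : insortAlt S e
                = (S.take (t - k') ++ [e]) ++ S.drop (t - k') := by
              conv_lhs => rw [← List.take_append_drop (t - k') S]
              rw [insortAlt_append_right _ _ _ hall, hdropcons]
              simp only [insortAlt, if_neg (show ¬ S[t - k']'(by omega) < e by omega)]
              rw [← hdropcons]
              simp
            have hlentake : (S.take (t - k') ++ [e]).length = (t - k') + 1 := by
              simp [hlentk]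
            rw [hins, List.take_left' hlentake, List.drop_left' hlentake]
            simp
          · push Not at hall
            obtain ⟨y, hy, hey⟩ := hall
            have hins : insortAlt S e
                = insortAlt (S.take (t - k')) e ++ S.drop (t - k') := by
              conv_lhs => rw [← List.take_append_drop (t - k') S]
              exact insortAlt_append_left _ _ _ ⟨y, hy, by omega⟩
            have hlentake : (insortAlt (S.take (t - k')) e).length = (t - k') + 1 := by
              rw [length_insortAlt, hlentk]
            rw [hins, List.take_left' hlentake, List.drop_left' hlentake,
              sum_insortAlt]
            constructor
            · ring
            · rfl
        refine List.cons_eq_cons.mpr ⟨?_, ?_⟩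
        · unfold preCost
          rw [hfin.1]
        · have := ih (pre ++ [e]) (.node x sr l r) hheap (by rw [hfin.2]; exact hperm)
          rw [hfin.1, hlen'] at this
          rw [hsz2]
          exact this

theorem length_expCosts (k' : Nat) : ∀ (xs pre : List Int), (expCosts k' pre xs).length = xs.length := by
  intro xs
  induction xs with
  | nil => intro pre; rfl
  | cons e rest ih => intro pre; simp [expCosts, ih]

theorem expCosts_getElem (k' : Nat) :
    ∀ (xs pre : List Int) (j : Nat) (hj : j < xs.length),
      (expCosts k' pre xs)[j]'(by rw [length_expCosts]; exact hj)
        = preCost k' (pre ++ xs.take (j + 1)) := by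
  intro xs
  induction xs with
  | nil => intro pre j hj; simp at hj
  | cons e rest ih =>
    intro pre j hj
    cases j with
    | zero => simp [expCosts]
    | succ j' =>
      have hj' : j' < rest.length := by simpa using hj
      simpa [expCosts, List.take_succ_cons] using ih (pre ++ [e]) j' hj'

-- A's probe value equals the precomputed cost
theorem nowSumA_eq_preCost (k' : Nat) (hk : 1 ≤ k') (enemy : List Int) (i : Nat) :
    nowSumA (k' : Int) enemy (i : Int) = preCost k' (enemy.take (i + 1)) := by
  unfold nowSumA preCost
  have h1 : ((i : Int) + 1) = ((i + 1 : Nat) : Int) := by push_cast; ring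
  rw [h1]
  simp only [PySem.List.slice_zero_start]
  rw [PySem.List.slice_to_natCast, PySem.List.slice_to_neg_natCast _ k' hk,
    PySem.List.length_sorted]

-- the two binary-search loops agree when the probe values agree on [0, len)
theorem loops_eq (n k : Int) (enemy costs : List Int)
    (hc : ∀ i : Int, 0 ≤ i → i < (enemy.length : Int) →
      PySem.List.pyGetD costs i 0 = nowSumA k enemy i) :
    ∀ (d : Nat) (lo hi : Int), (hi - lo).toNat = d → 0 ≤ lo → hi ≤ (enemy.length : Int) →
      solutionLoop n k enemy lo hi = bisectAlt n costs lo hi := by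
  intro d
  induction d using Nat.strong_induction_on with
  | _ d ih =>
    intro lo hi hd hlo hhi
    rw [solutionLoop, bisectAlt]
    by_cases h : lo < hi
    · rw [dif_pos h, dif_pos h]
      have hb := PySem.Int.floordiv_two_mid_bounds (le_of_lt h)
      have hlt : PySem.Int.floordiv (lo + hi) 2 < hi := by
        rw [PySem.Int.floordiv_lt_iff_lt_mul (by omega)]; omega
      set mid := PySem.Int.floordiv (lo + hi) 2 with hmid
      have hcm : PySem.List.pyGetD costs mid 0 = nowSumA k enemy mid :=
        hc mid (by omega) (by omega)
      show (if nowSumA k enemy mid ≤ n then solutionLoop n k enemy (mid + 1) hi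
            else solutionLoop n k enemy lo mid)
          = (if PySem.List.pyGetD costs mid 0 ≤ n then bisectAlt n costs (mid + 1) hi
            else bisectAlt n costs lo mid)
      rw [hcm]
      split_ifs with hcond
      · exact ih (hi - (mid + 1)).toNat (by omega) (mid + 1) hi rfl (by omega) hhi
      · exact ih (mid - lo).toNat (by omega) lo mid rfl hlo (by omega)
    · rw [dif_neg h, dif_neg h]

-- ===== VERDICT (by name: the statement is the Claim_ definition above) =====
theorem solution_spec : Claim_equal_solution := by
  intro n k enemy _hdom hpre
  have hk0 : 1 ≤ k := hpre
  have hkk : k = (k.toNat : Int) := by omega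
  have hk1 : 1 ≤ k.toNat := by omega
  unfold Spec_solution solution solution_alt
  have hnil : PySem.List.sorted ([] : List Int) (fun x => x) false = [] :=
    (PySem.List.sorted_eq_nil_iff _ _ _).mpr rfl
  have hcosts : buildCosts k .nil 0 0 enemy = expCosts k.toNat [] enemy := by
    have h := buildCosts_eq k.toNat hk1 enemy [] HeapAlt.nil trivial
      (by simp [toL, hnil])
    rw [hkk]
    simpa only [hnil, List.length_nil, Nat.zero_sub, List.take_nil, List.sum_nil,
      Nat.zero_min, Nat.cast_zero] using h
  refine loops_eq n k enemy (buildCosts k .nil 0 0 enemy) ?_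
    ((enemy.length : Int) - 0).toNat 0 (enemy.length : Int) rfl le_rfl le_rfl
  intro i h0 hlen
  obtain ⟨j, rfl⟩ : ∃ j : Nat, i = (j : Int) := ⟨i.toNat, (Int.toNat_of_nonneg h0).symm⟩
  have hjlen : j < enemy.length := by exact_mod_cast hlen
  rw [hcosts, PySem.List.pyGetD_natCast,
    List.getD_eq_getElem _ _ (by rw [length_expCosts]; exact hjlen),
    expCosts_getElem k.toNat enemy [] j hjlen, List.nil_append, hkk]
  exact (nowSumA_eq_preCost k.toNat hk1 enemy j).symm
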